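-- pv_equiv track=rewrite | github.com/bg6cq/wifibss | api/server.py | find_building
-- ===== SOURCE A (Python) =====
-- def find_building(name, mappings):
--     """Find building by longest prefix match."""
--     match = None
--     match_len = 0
--     for prefix, building in mappings:
--         if name.startswith(prefix) and len(prefix) > match_len:
--             match = building
--             match_len = len(prefix)
--     return match
-- ===== SOURCE B (Python) =====
-- def find_building(name, mappings):
--     """Find building by longest prefix match."""
--     for prefix, building in sorted(mappings, key=lambda pb: len(pb[0]), reverse=True):
--         if prefix and name.startswith(prefix):
--             return building
--     return None
-- ===== Notes on version B (the rewrite author's own statement) =====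
-- stated objective: alternative
-- what changed: Replaces the scan that tracks the best match and its length with a stable descending sort by prefix length followed by a first-match lookup; stability reproduces A's first-of-max tie rule and the nonempty-prefix guard reproduces A's strict '>' against the initial 0.
import Mathlib
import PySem

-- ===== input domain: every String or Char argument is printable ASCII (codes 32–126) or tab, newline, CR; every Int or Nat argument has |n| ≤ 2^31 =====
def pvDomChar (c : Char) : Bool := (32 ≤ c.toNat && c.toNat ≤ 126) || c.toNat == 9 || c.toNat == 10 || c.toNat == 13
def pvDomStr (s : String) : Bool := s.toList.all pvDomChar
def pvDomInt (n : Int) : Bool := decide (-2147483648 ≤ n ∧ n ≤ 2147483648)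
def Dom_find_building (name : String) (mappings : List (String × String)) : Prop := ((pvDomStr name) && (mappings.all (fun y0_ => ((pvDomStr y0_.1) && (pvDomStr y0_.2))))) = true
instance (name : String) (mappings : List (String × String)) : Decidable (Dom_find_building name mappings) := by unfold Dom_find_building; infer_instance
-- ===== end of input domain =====

-- B replaces A's best-so-far scan with a stable descending sort by prefix length
-- followed by taking the first matching (nonempty) prefix; same result, similar cost.

-- ===== PORT A =====
-- the loop's state is (match, match_len)
def find_building (name : String) (mappings : List (String × String)) : Option String :=
  (mappings.foldl
    (fun (acc : Option String × Int) pb =>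
      if PySem.Str.startswith name pb.1 = true ∧ acc.2 < PySem.Str.len pb.1
      then (some pb.2, PySem.Str.len pb.1)
      else acc)
    ((none : Option String), (0 : Int))).1

-- ===== PORT B =====
-- sort key: len(pb[0])
def pvKeyB (pb : String × String) : Int := PySem.Str.len pb.1

-- loop body test: 'if prefix and name.startswith(prefix)'
def pvHitB (name : String) (pb : String × String) : Bool :=
  decide (pb.1 ≠ "") && PySem.Str.startswith name pb.1

def find_building_alt (name : String) (mappings : List (String × String)) : Option String :=
  ((PySem.List.sorted mappings pvKeyB true).find? (pvHitB name)).map (·.2)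

-- ===== PRECONDITION & SPEC =====
def Spec_find_building (name : String) (mappings : List (String × String)) (out : Option String) : Prop := out = find_building_alt name mappings
instance (name : String) (mappings : List (String × String)) (out : Option String) : Decidable (Spec_find_building name mappings out) := by unfold Spec_find_building; infer_instance

-- ===== CLAIM (what is proved, stated in full; the proofs are below) =====
def Claim_equal_find_building : Prop := ∀ (name : String) (mappings : List (String × String)), Dom_find_building name mappings → Spec_find_building name mappings (find_building name mappings)

-- ===== LEMMAS AND PROOFS =====

-- the step function of A's loop, named for the proofs below
def pvStepA (name : String) (acc : Option String × Int) (pb : String × String) :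
    Option String × Int :=
  if PySem.Str.startswith name pb.1 = true ∧ acc.2 < PySem.Str.len pb.1
  then (some pb.2, PySem.Str.len pb.1)
  else acc

lemma find_building_eq_foldl (name : String) (mappings : List (String × String)) :
    find_building name mappings
      = (mappings.foldl (pvStepA name) ((none : Option String), (0 : Int))).1 := rfl

-- a pair passes B's test iff its prefix is nonempty (positive length) and matches
lemma pvHitB_iff (name : String) (pb : String × String) :
    pvHitB name pb = true ↔
      (0 < PySem.Str.len pb.1 ∧ PySem.Str.startswith name pb.1 = true) := by
  unfold pvHitB
  rw [Bool.and_eq_true, decide_eq_true_eq, PySem.Str.len_eq]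
  constructor
  · rintro ⟨h1, h2⟩
    refine ⟨?_, h2⟩
    have hne : pb.1.toList ≠ [] := fun h => h1 (String.toList_eq_nil_iff.mp h)
    exact_mod_cast List.length_pos_iff.mpr hne
  · rintro ⟨h1, h2⟩
    refine ⟨?_, h2⟩
    intro he
    rw [he] at h1
    simp at h1

lemma pvKeyB_nonneg (pb : String × String) : 0 ≤ pvKeyB pb := by
  rw [pvKeyB, PySem.Str.len_eq]
  exact Int.natCast_nonneg _

-- inserting x into a descending-sorted list: the first hit of the result is x exactly
-- when x hits and strictly beats every hit already present, else the old first hit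
lemma pv_ins_find (name : String) (x : String × String) (ys : List (String × String))
    (h : List.Pairwise (fun a b => pvKeyB b ≤ pvKeyB a) ys) :
    (PySem.List.insertBy (fun a b => decide (pvKeyB b < pvKeyB a)) x ys).find? (pvHitB name)
      = if pvHitB name x = true ∧ (∀ y ∈ ys, pvHitB name y = true → pvKeyB y < pvKeyB x)
        then some x else ys.find? (pvHitB name) := by
  induction ys with
  | nil =>
    by_cases hx : pvHitB name x = true
    · rw [if_pos ⟨hx, by simp⟩]
      simp [PySem.List.insertBy, hx]
    · rw [if_neg (fun hc => hx hc.1)]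
      simp [PySem.List.insertBy, hx]
  | cons y ys ih =>
    rw [List.pairwise_cons] at h
    by_cases hlt : pvKeyB y < pvKeyB x
    · -- x goes in front of y
      have hins : PySem.List.insertBy (fun a b => decide (pvKeyB b < pvKeyB a)) x (y :: ys)
          = x :: y :: ys := by
        simp [PySem.List.insertBy, hlt]
      rw [hins]
      by_cases hx : pvHitB name x = true
      · have hall : ∀ z ∈ y :: ys, pvHitB name z = true → pvKeyB z < pvKeyB x := by
          intro z hz _
          rcases List.mem_cons.1 hz with rfl | hz
          · exact hlt
          · exact lt_of_le_of_lt (h.1 z hz) hlt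
        rw [List.find?_cons_of_pos hx, if_pos ⟨hx, hall⟩]
      · rw [List.find?_cons_of_neg hx, if_neg (fun hc => hx hc.1)]
    · -- x goes after y
      have hins : PySem.List.insertBy (fun a b => decide (pvKeyB b < pvKeyB a)) x (y :: ys)
          = y :: PySem.List.insertBy (fun a b => decide (pvKeyB b < pvKeyB a)) x ys := by
        simp [PySem.List.insertBy, hlt]
      rw [hins]
      by_cases hy : pvHitB name y = true
      · -- old first hit is y; the condition fails because y hits with key ≥ key x
        have hcond : ¬ (pvHitB name x = true ∧
            (∀ z ∈ y :: ys, pvHitB name z = true → pvKeyB z < pvKeyB x)) := by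
          rintro ⟨-, hall⟩
          exact hlt (hall y List.mem_cons_self hy)
        rw [List.find?_cons_of_pos hy, if_neg hcond, List.find?_cons_of_pos hy]
      · rw [List.find?_cons_of_neg hy, ih h.2]
        have hiff : (pvHitB name x = true ∧
              (∀ z ∈ ys, pvHitB name z = true → pvKeyB z < pvKeyB x))
            ↔ (pvHitB name x = true ∧
              (∀ z ∈ y :: ys, pvHitB name z = true → pvKeyB z < pvKeyB x)) := by
          constructor
          · rintro ⟨hx, hall⟩
            refine ⟨hx, ?_⟩
            intro z hz hzh
            rcases List.mem_cons.1 hz with rfl | hz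
            · exact absurd hzh hy
            · exact hall z hz hzh
          · rintro ⟨hx, hall⟩
            exact ⟨hx, fun z hz => hall z (List.mem_cons_of_mem _ hz)⟩
        rw [if_congr hiff rfl rfl, List.find?_cons_of_neg hy]

-- appending one pair to the input inserts it into the sorted list
lemma pv_sorted_append (xs : List (String × String)) (x : String × String) :
    PySem.List.sorted (xs ++ [x]) pvKeyB true
      = PySem.List.insertBy (fun a b => decide (pvKeyB b < pvKeyB a)) x
          (PySem.List.sorted xs pvKeyB true) := by
  rw [PySem.List.sorted_rev_eq_foldl_insertBy, PySem.List.sorted_rev_eq_foldl_insertBy,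
    List.foldl_append]
  rfl

-- the loop invariant tying A's (match, match_len) state to B's first hit of the sorted list
lemma pv_inv (name : String) (xs : List (String × String)) :
    ((xs.foldl (pvStepA name) ((none : Option String), (0 : Int))).1
        = ((PySem.List.sorted xs pvKeyB true).find? (pvHitB name)).map (·.2))
    ∧ ((xs.foldl (pvStepA name) ((none : Option String), (0 : Int))).2
        = (((PySem.List.sorted xs pvKeyB true).find? (pvHitB name)).map pvKeyB).getD 0)
    ∧ (∀ y ∈ xs, pvHitB name y = true →
        pvKeyB y ≤ (((PySem.List.sorted xs pvKeyB true).find? (pvHitB name)).map pvKeyB).getD 0)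
    ∧ 0 ≤ (((PySem.List.sorted xs pvKeyB true).find? (pvHitB name)).map pvKeyB).getD 0 := by
  induction xs using List.reverseRecOn with
  | nil =>
    simp [PySem.List.sorted]
  | append_singleton xs x ih =>
    obtain ⟨ih1, ih2, ih3, ih4⟩ := ih
    rw [List.foldl_append, List.foldl_cons, List.foldl_nil, pv_sorted_append,
      pv_ins_find name x _ (PySem.List.sorted_pairwise_rev xs pvKeyB)]
    set st := xs.foldl (pvStepA name) ((none : Option String), (0 : Int)) with hst
    set r := (PySem.List.sorted xs pvKeyB true).find? (pvHitB name) with hr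
    -- A's step condition coincides with the insertion lemma's condition
    have hcondeq : (PySem.Str.startswith name x.1 = true ∧ st.2 < PySem.Str.len x.1)
        ↔ (pvHitB name x = true ∧
            (∀ y ∈ PySem.List.sorted xs pvKeyB true, pvHitB name y = true →
              pvKeyB y < pvKeyB x)) := by
      constructor
      · rintro ⟨hsw, hgt⟩
        rw [ih2] at hgt
        have hpos : 0 < PySem.Str.len x.1 := lt_of_le_of_lt ih4 hgt
        refine ⟨(pvHitB_iff name x).2 ⟨hpos, hsw⟩, ?_⟩
        intro y hy hhy
        have hy' : y ∈ xs := (PySem.List.mem_sorted xs pvKeyB true y).1 hy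
        exact lt_of_le_of_lt (ih3 y hy' hhy) hgt
      · rintro ⟨hx, hall⟩
        obtain ⟨hpos, hsw⟩ := (pvHitB_iff name x).1 hx
        refine ⟨hsw, ?_⟩
        rw [ih2]
        cases hfind : r with
        | none =>
          simpa using hpos
        | some m =>
          have hm : m ∈ PySem.List.sorted xs pvKeyB true := List.mem_of_find?_eq_some hfind
          have hmh : pvHitB name m = true := List.find?_some hfind
          simpa [pvKeyB] using hall m hm hmh
    by_cases hc : PySem.Str.startswith name x.1 = true ∧ st.2 < PySem.Str.len x.1
    · have hc' := hcondeq.1 hc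
      rw [show pvStepA name st x = (some x.2, PySem.Str.len x.1) from if_pos hc,
        if_pos hc']
      refine ⟨rfl, rfl, ?_, ?_⟩
      · intro y hy hhy
        rcases List.mem_append.1 hy with hy | hy
        · exact le_of_lt (lt_of_le_of_lt (ih3 y hy hhy) (by rw [← ih2]; exact hc.2))
        · rw [show y = x from by simpa using hy]
          exact le_refl _
      · simpa using pvKeyB_nonneg x
    · have hc' := (not_iff_not.2 hcondeq).1 hc
      rw [show pvStepA name st x = st from if_neg hc, if_neg hc']
      refine ⟨ih1, ih2, ?_, ih4⟩
      intro y hy hhy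
      rcases List.mem_append.1 hy with hy | hy
      · exact ih3 y hy hhy
      · rw [show y = x from by simpa using hy] at hhy ⊢
        obtain ⟨hpos, hsw⟩ := (pvHitB_iff name x).1 hhy
        by_contra hgt
        rw [not_le] at hgt
        rw [← ih2] at hgt
        exact hc ⟨hsw, by simpa [pvKeyB] using hgt⟩

-- ===== VERDICT (by name: the statement is the Claim_ definition above) =====
theorem find_building_spec : Claim_equal_find_building := by
  intro name mappings _
  unfold Spec_find_building find_building_alt
  rw [find_building_eq_foldl]
  exact (pv_inv name mappings).1
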